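-- pv_equiv track=rewrite | github.com/coff33ninja/linkwarden_enhancer | core/validation_engine.py | _has_circular_reference
-- ===== SOURCE A (Python) =====
-- from typing import Dict, List, Any, Optional, Tuple
--
-- def _has_circular_reference(collection: Dict[str, Any], all_collections: List[Dict[str, Any]]) -> bool:
--     """Check if collection has circular parent reference"""
--
--     visited = set()
--     current_id = collection['id']
--
--     # Create parent lookup
--     parent_lookup = {col['id']: col.get('parent_id') for col in all_collections}
--
--     while current_id:
--         if current_id in visited:
--             return True
--
--         visited.add(current_id)
--         current_id = parent_lookup.get(current_id)
--
--     return False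
-- ===== SOURCE B (Python) =====
-- def _has_circular_reference(collection, all_collections):
--     """Bounded walk: a truthy parent chain longer than the number of collections must repeat."""
--     parent_lookup = {col['id']: col.get('parent_id') for col in all_collections}
--     current = collection['id']
--     for _ in range(len(all_collections) + 2):
--         if not current:
--             return False
--         current = parent_lookup.get(current)
--     return True
-- ===== Notes on version B (the rewrite author's own statement) =====
-- stated objective: alternative
-- what changed: B drops A's visited-set bookkeeping and instead walks the parent chain a pigeonhole-bounded number of steps (len(all_collections)+2): a truthy chain that long must contain a repeat, so surviving the bounded walk means a cycle.
import Mathlib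
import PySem

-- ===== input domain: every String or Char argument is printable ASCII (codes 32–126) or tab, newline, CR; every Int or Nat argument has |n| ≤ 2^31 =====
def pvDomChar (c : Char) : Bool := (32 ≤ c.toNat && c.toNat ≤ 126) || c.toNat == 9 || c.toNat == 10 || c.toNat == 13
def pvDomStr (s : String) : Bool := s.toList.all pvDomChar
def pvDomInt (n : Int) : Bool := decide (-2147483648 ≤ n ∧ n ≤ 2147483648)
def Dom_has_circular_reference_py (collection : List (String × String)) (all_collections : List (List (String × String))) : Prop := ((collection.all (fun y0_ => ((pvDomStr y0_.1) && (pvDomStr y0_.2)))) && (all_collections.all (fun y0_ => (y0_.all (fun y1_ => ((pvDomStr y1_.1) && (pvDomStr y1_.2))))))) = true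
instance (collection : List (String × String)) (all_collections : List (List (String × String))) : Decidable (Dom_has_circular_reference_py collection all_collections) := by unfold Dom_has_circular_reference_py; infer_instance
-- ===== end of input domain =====

-- B replaces A's visited-set loop by a pigeonhole-bounded walk of the parent chain (len+2 steps); alternative decomposition, same cost.


-- ===== PORT A =====
-- parent_lookup = {col['id']: col.get('parent_id') for col in all_collections}
-- (col['id'] raises KeyError when absent; Pre_ requires the key, the 'getD "" ' default is only reached outside Pre_)
def pvParentLookup (all_collections : List (List (String × String))) : PySem.Dict String (Option String) :=
  all_collections.foldl
    (fun d col => d.insert ((PySem.Dict.ofList col).getD "id" "") ((PySem.Dict.ofList col).get? "parent_id"))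
    PySem.Dict.empty

-- termination measure for A's while loop: keys of parent_lookup not yet visited, +1 if current_id is not None
def pvAmsr (lookup : PySem.Dict String (Option String)) (visited : PySem.Set String)
    (cur : Option String) : Nat :=
  ((PySem.Dict.keys lookup).filter (fun k => !(PySem.Set.contains visited k))).length +
    (if cur.isSome then 1 else 0)

theorem pvAmsr_lt (lookup : PySem.Dict String (Option String)) (visited : PySem.Set String)
    (c : String) (hnv : PySem.Set.contains visited c = false) :
    pvAmsr lookup (PySem.Set.add visited c) ((PySem.Dict.get? lookup c).join) <
      pvAmsr lookup visited (some c) := by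
  unfold pvAmsr
  have hcnm : c ∉ visited := fun hm => by
    rw [(PySem.Set.contains_iff visited c).mpr hm] at hnv; cases hnv
  have hmono : ∀ k, (!(PySem.Set.contains (PySem.Set.add visited c) k)) = true →
      (!(PySem.Set.contains visited k)) = true := by
    intro k hk
    cases hkv : PySem.Set.contains visited k
    · rfl
    · exfalso
      have hmem : k ∈ PySem.Set.add visited c :=
        (PySem.Set.mem_add _ _ _).mpr (Or.inl ((PySem.Set.contains_iff _ _).mp hkv))
      rw [(PySem.Set.contains_iff _ _).mpr hmem] at hk
      simp at hk
  have hsub := List.monotone_filter_right (PySem.Dict.keys lookup) hmono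
  have hle := hsub.length_le
  by_cases hck : c ∈ PySem.Dict.keys lookup
  · -- strict decrease on the key count
    have hcadd : PySem.Set.contains (PySem.Set.add visited c) c = true :=
      (PySem.Set.contains_iff _ _).mpr ((PySem.Set.mem_add _ _ _).mpr (Or.inr rfl))
    have hcq : c ∈ (PySem.Dict.keys lookup).filter (fun k => !(PySem.Set.contains visited k)) :=
      List.mem_filter.mpr ⟨hck, by rw [hnv]; rfl⟩
    have hcp : c ∉ (PySem.Dict.keys lookup).filter
        (fun k => !(PySem.Set.contains (PySem.Set.add visited c) k)) := by
      intro hmem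
      have := (List.mem_filter.mp hmem).2
      rw [hcadd] at this
      simp at this
    have hlt : ((PySem.Dict.keys lookup).filter
        (fun k => !(PySem.Set.contains (PySem.Set.add visited c) k))).length <
        ((PySem.Dict.keys lookup).filter (fun k => !(PySem.Set.contains visited k))).length := by
      rcases Nat.lt_or_ge ((PySem.Dict.keys lookup).filter
          (fun k => !(PySem.Set.contains (PySem.Set.add visited c) k))).length
          ((PySem.Dict.keys lookup).filter (fun k => !(PySem.Set.contains visited k))).length with h | h
      · exact h
      · exfalso
        have heq := hsub.eq_of_length (Nat.le_antisymm hle h)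
        rw [heq] at hcp
        exact hcp hcq
    have hif : (if ((PySem.Dict.get? lookup c).join).isSome then 1 else 0) ≤ 1 := by
      split <;> omega
    have he : (if (some c : Option String).isSome = true then 1 else 0) = 1 := rfl
    omega
  · -- c is no key: lookup.get(c) is None, so the +1 term vanishes
    have hnone : PySem.Dict.get? lookup c = none :=
      (PySem.Dict.get?_eq_none_iff_not_mem_keys _ _).mpr hck
    rw [hnone]
    have hd : (if (Option.join (none : Option (Option String))).isSome = true then 1 else 0) = 0 := rfl
    have he : (if (some c : Option String).isSome = true then 1 else 0) = 1 := rfl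
    omega

-- the while loop of A: visited set, current id (None once lookup.get misses)
def pvLoopA (lookup : PySem.Dict String (Option String)) (visited : PySem.Set String) :
    Option String → Bool
  | none => false                                  -- while current_id: falsy → return False
  | some c =>
    if c = "" then false                           -- falsy string
    else if PySem.Set.contains visited c then true -- current_id in visited
    else pvLoopA lookup (PySem.Set.add visited c) ((PySem.Dict.get? lookup c).join)
termination_by cur => pvAmsr lookup visited cur
decreasing_by exact pvAmsr_lt lookup visited c (by simp_all)

def has_circular_reference_py (collection : List (String × String)) (all_collections : List (List (String × String))) : Bool :=
  match (PySem.Dict.ofList collection).get? "id" with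
  | none => false   -- collection['id'] raises KeyError; excluded by Pre_
  | some start => pvLoopA (pvParentLookup all_collections) PySem.Set.empty (some start)

-- ===== PORT B =====
-- for _ in range(len(all_collections)+2): if not current: return False; current = parent_lookup.get(current); then return True
def pvLoopB (lookup : PySem.Dict String (Option String)) : Nat → Option String → Bool
  | 0, _ => true
  | _ + 1, none => false
  | f + 1, some c =>
    if c = "" then false
    else pvLoopB lookup f ((PySem.Dict.get? lookup c).join)

def has_circular_reference_py_alt (collection : List (String × String)) (all_collections : List (List (String × String))) : Bool :=
  match (PySem.Dict.ofList collection).get? "id" with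
  | none => false   -- collection['id'] raises KeyError; excluded by Pre_
  | some start => pvLoopB (pvParentLookup all_collections) (all_collections.length + 2) (some start)

-- ===== PRECONDITION & SPEC =====
-- Python raises KeyError iff collection or some member of all_collections lacks the key 'id'; exactly those inputs are excluded.
def Pre_has_circular_reference_py (collection : List (String × String)) (all_collections : List (List (String × String))) : Prop :=
  (PySem.Dict.ofList collection).contains "id" = true ∧
    ∀ col ∈ all_collections, (PySem.Dict.ofList col).contains "id" = true
instance (collection : List (String × String)) (all_collections : List (List (String × String))) : Decidable (Pre_has_circular_reference_py collection all_collections) := by unfold Pre_has_circular_reference_py; infer_instance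

def pvWitness_has_circular_reference_py : (List (String × String)) × (List (List (String × String))) :=
  ([("id", "a")], [[("id", "a"), ("parent_id", "b")], [("id", "b"), ("parent_id", "a")]])

def Spec_has_circular_reference_py (collection : List (String × String)) (all_collections : List (List (String × String))) (out : Bool) : Prop := out = has_circular_reference_py_alt collection all_collections
instance (collection : List (String × String)) (all_collections : List (List (String × String))) (out : Bool) : Decidable (Spec_has_circular_reference_py collection all_collections out) := by unfold Spec_has_circular_reference_py; infer_instance

-- ===== CLAIM (what is proved, stated in full; the proofs are below) =====
def Claim_equal_has_circular_reference_py : Prop := ∀ (collection : List (String × String)) (all_collections : List (List (String × String))), Dom_has_circular_reference_py collection all_collections → Pre_has_circular_reference_py collection all_collections → Spec_has_circular_reference_py collection all_collections (has_circular_reference_py collection all_collections)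

-- ===== LEMMAS AND PROOFS =====

-- the chain step, with falsy results normalised to none
def pvStep (lookup : PySem.Dict String (Option String)) (c : String) : Option String :=
  match (PySem.Dict.get? lookup c).join with
  | none => none
  | some t => if t = "" then none else some t

theorem pvLoopB_step (lookup : PySem.Dict String (Option String)) (f : Nat) (c : String) :
    pvLoopB lookup f ((PySem.Dict.get? lookup c).join) = pvLoopB lookup f (pvStep lookup c) := by
  cases hj : (PySem.Dict.get? lookup c).join with
  | none => simp only [pvStep, hj]
  | some t =>
    simp only [pvStep, hj]
    by_cases ht : t = ""
    · subst ht
      rw [if_pos rfl]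
      cases f with
      | zero => rfl
      | succ f => simp [pvLoopB]
    · rw [if_neg ht]

-- a set closed under pvStep with only truthy members: the walk from any member never dies
def pvClosed (lookup : PySem.Dict String (Option String)) (s : PySem.Set String) : Prop :=
  ∀ v ∈ s, v ≠ "" ∧ ∃ w, pvStep lookup v = some w ∧ w ∈ s

theorem pvLoopB_of_closed (lookup : PySem.Dict String (Option String)) (s : PySem.Set String)
    (hcl : pvClosed lookup s) (f : Nat) : ∀ c ∈ s, pvLoopB lookup f (some c) = true := by
  induction f with
  | zero => intro c _; rfl
  | succ f ih =>
    intro c hc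
    obtain ⟨hne, w, hw, hws⟩ := hcl c hc
    simp only [pvLoopB]
    rw [if_neg hne, pvLoopB_step, hw]
    exact ih w hws

-- A's loop invariant: every visited node is truthy and steps into visited or to the current node
def pvInv (lookup : PySem.Dict String (Option String)) (s : PySem.Set String)
    (cur : Option String) : Prop :=
  ∀ v ∈ s, v ≠ "" ∧ ∃ w, pvStep lookup v = some w ∧ (w ∈ s ∨ some w = cur)

-- A found a cycle ⇒ the walk is infinite ⇒ B's bounded walk survives any fuel
theorem pvLoopA_true (lookup : PySem.Dict String (Option String)) :
    ∀ (visited : PySem.Set String) (cur : Option String), pvInv lookup visited cur →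
      pvLoopA lookup visited cur = true → ∀ f, pvLoopB lookup f cur = true := by
  intro visited cur
  induction visited, cur using pvLoopA.induct lookup with
  | case1 visited => intro _ h; simp [pvLoopA] at h
  | case2 visited => intro _ h; simp [pvLoopA] at h
  | case3 visited c hc hmem =>
    intro hinv _ f
    have hcs : c ∈ visited := (PySem.Set.contains_iff _ _).mp hmem
    have hcl : pvClosed lookup visited := by
      intro v hv
      obtain ⟨hne, w, hw, hws⟩ := hinv v hv
      exact ⟨hne, w, hw, hws.elim id (fun he => by cases he; exact hcs)⟩
    exact pvLoopB_of_closed lookup visited hcl f c hcs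
  | case4 visited c hc hmem ih =>
    intro hinv htrue
    rw [pvLoopA, if_neg hc, if_neg hmem] at htrue
    cases hj : (PySem.Dict.get? lookup c).join with
    | none => rw [hj] at htrue; simp [pvLoopA] at htrue
    | some t =>
      rw [hj] at htrue ih
      by_cases ht : t = ""
      · subst ht; simp [pvLoopA] at htrue
      · have hstep : pvStep lookup c = some t := by simp only [pvStep, hj]; rw [if_neg ht]
        have hinv' : pvInv lookup (PySem.Set.add visited c) (some t) := by
          intro v hv
          rw [PySem.Set.mem_add] at hv
          rcases hv with hv | hv
          · obtain ⟨hne, w, hw, hws⟩ := hinv v hv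
            refine ⟨hne, w, hw, Or.inl ?_⟩
            rw [PySem.Set.mem_add]
            exact hws.elim Or.inl (fun he => by cases he; exact Or.inr rfl)
          · subst hv
            exact ⟨hc, t, hstep, Or.inr rfl⟩
        have hall := ih hinv' htrue
        intro f
        cases f with
        | zero => rfl
        | succ f =>
          simp only [pvLoopB]
          rw [if_neg hc, hj]
          exact hall f

-- A found no cycle ⇒ the walk dies within the measure ⇒ B's walk with enough fuel returns false
theorem pvLoopA_false (lookup : PySem.Dict String (Option String)) :
    ∀ (visited : PySem.Set String) (cur : Option String), pvLoopA lookup visited cur = false →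
      ∀ f, pvAmsr lookup visited cur + 1 ≤ f → pvLoopB lookup f cur = false := by
  intro visited cur
  induction visited, cur using pvLoopA.induct lookup with
  | case1 visited =>
    intro _ f hf
    obtain ⟨f, rfl⟩ := Nat.exists_eq_succ_of_ne_zero (by omega : f ≠ 0)
    rfl
  | case2 visited =>
    intro _ f hf
    obtain ⟨f, rfl⟩ := Nat.exists_eq_succ_of_ne_zero (by omega : f ≠ 0)
    simp [pvLoopB]
  | case3 visited c hc hmem =>
    intro hfalse
    rw [pvLoopA, if_neg hc, if_pos hmem] at hfalse
    simp at hfalse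
  | case4 visited c hc hmem ih =>
    intro hfalse f hf
    rw [pvLoopA, if_neg hc, if_neg hmem] at hfalse
    have hlt := pvAmsr_lt lookup visited c (by simp only [Bool.not_eq_true] at hmem; exact hmem)
    have h1 : (if (some c : Option String).isSome = true then 1 else 0) = 1 := rfl
    have hge : pvAmsr lookup visited (some c) ≥ 1 := by unfold pvAmsr; omega
    obtain ⟨f, rfl⟩ := Nat.exists_eq_succ_of_ne_zero (by omega : f ≠ 0)
    simp only [pvLoopB]
    rw [if_neg hc]
    exact ih hfalse f (by omega)

-- the measure at start: number of keys of the lookup, ≤ number of collections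
theorem pvAmsr_start (all_collections : List (List (String × String))) (c : String) :
    pvAmsr (pvParentLookup all_collections) PySem.Set.empty (some c) ≤
      all_collections.length + 1 := by
  unfold pvAmsr
  have hkeys : (PySem.Dict.keys (pvParentLookup all_collections)).length ≤
      all_collections.length := by
    unfold pvParentLookup
    rw [PySem.Dict.keys_foldl_insert_key]
    calc (PySem.Set.update (PySem.Dict.keys PySem.Dict.empty)
            (all_collections.map fun col => (PySem.Dict.ofList col).getD "id" "")).length
        = (PySem.Set.ofList
            (all_collections.map fun col => (PySem.Dict.ofList col).getD "id" "")).length := by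
          rw [PySem.Dict.keys_empty, PySem.Set.update_nil_left]
      _ ≤ (all_collections.map fun col => (PySem.Dict.ofList col).getD "id" "").length :=
          PySem.Set.length_ofList_le _
      _ = all_collections.length := List.length_map ..
  have hfl : ((PySem.Dict.keys (pvParentLookup all_collections)).filter
      (fun k => !(PySem.Set.contains PySem.Set.empty k))).length ≤
      (PySem.Dict.keys (pvParentLookup all_collections)).length :=
    List.length_filter_le _ _
  have h1 : (if (some c : Option String).isSome = true then 1 else 0) = 1 := rfl
  omega

-- ===== VERDICT (by name: the statement is the Claim_ definition above) =====
theorem has_circular_reference_py_spec : Claim_equal_has_circular_reference_py := by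
  intro collection all_collections _ _
  unfold Spec_has_circular_reference_py has_circular_reference_py has_circular_reference_py_alt
  cases hid : (PySem.Dict.ofList collection).get? "id" with
  | none => rfl
  | some start =>
    simp only
    cases hA : pvLoopA (pvParentLookup all_collections) PySem.Set.empty (some start) with
    | true =>
      exact (pvLoopA_true (pvParentLookup all_collections) PySem.Set.empty (some start)
        (by intro v hv; simp [PySem.Set.empty] at hv) hA
        (all_collections.length + 2)).symm
    | false =>
      refine (pvLoopA_false (pvParentLookup all_collections) PySem.Set.empty (some start) hA
        (all_collections.length + 2) ?_).symm
      have := pvAmsr_start all_collections start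
      omega
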